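-- pv_equiv track=rewrite | github.com/xinfushe/project | Beignet-0.9.3-Source/utests/utest_generator.py | gene3ValuesLoop
-- ===== SOURCE A (Python) =====
-- def gene3ValuesLoop(values1,values2,values3,inputValues):
--   for i in inputValues:
--     for j in range(0,len(inputValues)):
--       for k in range(0,len(inputValues)):
--         values1 += [i]
--
--   for i in inputValues:
--     for j in inputValues:
--       for k in range(0,len(inputValues)):
--         values2 += [j]
--
--   values3=inputValues*(len(inputValues)**2)
--   return values1,values2,values3
-- ===== SOURCE B (Python) =====
-- def gene3ValuesLoop(values1, values2, values3, inputValues):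
--     n = len(inputValues)
--     block1 = []
--     block2 = []
--     for x in inputValues:
--         block1 += [x] * (n * n)
--         block2 += [x] * n
--     values1 += block1
--     values2 += block2 * n
--     values3 = inputValues * (n * n)
--     return values1, values2, values3
-- ===== Notes on version B (the rewrite author's own statement) =====
-- stated objective: faster
-- what changed: Replaces the three triple-nested append loops by list-repetition arithmetic: one pass builds per-element repetition blocks, then a single '*' replication produces each result list.
import Mathlib
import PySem

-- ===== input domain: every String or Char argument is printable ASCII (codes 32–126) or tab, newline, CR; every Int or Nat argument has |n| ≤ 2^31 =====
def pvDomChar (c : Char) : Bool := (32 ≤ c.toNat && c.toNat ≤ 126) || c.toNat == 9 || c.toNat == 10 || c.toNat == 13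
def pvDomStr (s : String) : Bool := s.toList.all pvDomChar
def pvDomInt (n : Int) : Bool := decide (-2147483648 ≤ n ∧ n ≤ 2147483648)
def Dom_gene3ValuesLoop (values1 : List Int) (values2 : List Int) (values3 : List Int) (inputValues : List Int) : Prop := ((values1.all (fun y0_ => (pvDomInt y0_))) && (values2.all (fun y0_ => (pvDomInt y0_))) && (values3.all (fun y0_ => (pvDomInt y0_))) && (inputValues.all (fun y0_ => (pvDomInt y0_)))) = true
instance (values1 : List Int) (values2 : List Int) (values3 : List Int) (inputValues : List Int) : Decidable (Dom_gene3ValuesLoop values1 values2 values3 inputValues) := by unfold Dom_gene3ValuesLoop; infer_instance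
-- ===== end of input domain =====

-- B builds the three result lists by list-repetition arithmetic (one pass plus '*') instead of
-- A's triple-nested append loops. Both Pythons mutate values1/values2 in place via '+='; the
-- equivalence proved here is about the return value.

-- ===== PORT A =====
def gene3ValuesLoop (values1 : List Int) (values2 : List Int) (values3 : List Int) (inputValues : List Int) : List Int × List Int × List Int :=
  let v1 := inputValues.foldl (fun acc i =>
    (PySem.List.pyRange 0 (inputValues.length : Int) 1).foldl (fun acc _j =>
      (PySem.List.pyRange 0 (inputValues.length : Int) 1).foldl (fun acc _k =>
        acc ++ [i]) acc) acc) values1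
  let v2 := inputValues.foldl (fun acc i =>
    inputValues.foldl (fun acc j =>
      (PySem.List.pyRange 0 (inputValues.length : Int) 1).foldl (fun acc _k =>
        acc ++ [j]) acc) acc) values2
  let v3 := PySem.List.pyRepeat inputValues ((inputValues.length : Int) ^ 2)
  (v1, v2, v3)

-- ===== PORT B =====
def gene3ValuesLoop_alt (values1 : List Int) (values2 : List Int) (values3 : List Int) (inputValues : List Int) : List Int × List Int × List Int :=
  let n : Int := inputValues.length
  let blocks := inputValues.foldl (fun (b : List Int × List Int) x =>
    (b.1 ++ PySem.List.pyRepeat [x] (n * n), b.2 ++ PySem.List.pyRepeat [x] n)) ([], [])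
  (values1 ++ blocks.1,
   values2 ++ PySem.List.pyRepeat blocks.2 n,
   PySem.List.pyRepeat inputValues (n * n))

-- ===== PRECONDITION & SPEC =====
def Spec_gene3ValuesLoop (values1 : List Int) (values2 : List Int) (values3 : List Int) (inputValues : List Int) (out : List Int × List Int × List Int) : Prop := out = gene3ValuesLoop_alt values1 values2 values3 inputValues
instance (values1 : List Int) (values2 : List Int) (values3 : List Int) (inputValues : List Int) (out : List Int × List Int × List Int) : Decidable (Spec_gene3ValuesLoop values1 values2 values3 inputValues out) := by unfold Spec_gene3ValuesLoop; infer_instance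

-- ===== CLAIM (what is proved, stated in full; the proofs are below) =====
def Claim_equal_gene3ValuesLoop : Prop := ∀ (values1 : List Int) (values2 : List Int) (values3 : List Int) (inputValues : List Int), Dom_gene3ValuesLoop values1 values2 values3 inputValues → Spec_gene3ValuesLoop values1 values2 values3 inputValues (gene3ValuesLoop values1 values2 values3 inputValues)

-- ===== LEMMAS AND PROOFS =====

-- a fold that appends the same list once per element appends it length-many times
theorem pv_foldl_const_append {α : Type} (l : List α) (r acc : List Int) :
    l.foldl (fun a _ => a ++ r) acc = acc ++ (List.replicate l.length r).flatten := by
  induction l generalizing acc with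
  | nil => simp
  | cons x t ih => simp [List.foldl_cons, ih, List.replicate_succ, List.append_assoc]

-- the pair-accumulating fold of B computes the two flatMaps componentwise
theorem pv_pairfold (l : List Int) (f g : Int → List Int) (b : List Int × List Int) :
    l.foldl (fun (b : List Int × List Int) x => (b.1 ++ f x, b.2 ++ g x)) b
      = (b.1 ++ l.flatMap f, b.2 ++ l.flatMap g) := by
  induction l generalizing b with
  | nil => simp
  | cons x t ih => simp [List.foldl_cons, ih, List.flatMap_cons, List.append_assoc]


-- flatten of replicated replicate is one replicate
theorem pv_rep_flat (m p : Nat) (i : Int) :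
    (List.replicate m (List.replicate p i)).flatten = List.replicate (m * p) i := by
  induction m with
  | zero => simp
  | succ k ih =>
    simp [List.replicate_succ, List.flatten_cons, ih, Nat.succ_mul, Nat.add_comm]

-- innermost loop of A: append [i] once per element of rng
theorem pv_inner (rng : List Int) (i : Int) (acc : List Int) :
    rng.foldl (fun a _ => a ++ [i]) acc = acc ++ List.replicate rng.length i := by
  rw [pv_foldl_const_append]
  have h1 : ([i] : List Int) = List.replicate 1 i := by simp
  rw [h1, pv_rep_flat, Nat.mul_one]

-- the whole values1 triple loop
theorem pv_A1 (l rng : List Int) (acc : List Int) :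
    l.foldl (fun acc i => rng.foldl (fun acc _ => rng.foldl (fun acc _ => acc ++ [i]) acc) acc) acc
      = acc ++ l.flatMap (fun i => List.replicate (rng.length * rng.length) i) := by
  have h : (fun (acc : List Int) (i : Int) =>
      rng.foldl (fun acc _ => rng.foldl (fun acc _ => acc ++ [i]) acc) acc)
      = fun acc i => acc ++ List.replicate (rng.length * rng.length) i := by
    funext acc i
    simp only [pv_inner]
    simp only [pv_foldl_const_append, pv_rep_flat]
  rw [h, PySem.List.foldl_append_eq_flatMap]

-- the whole values2 triple loop
theorem pv_A2 (l l2 rng : List Int) (acc : List Int) :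
    l.foldl (fun acc _i => l2.foldl (fun acc j => rng.foldl (fun acc _ => acc ++ [j]) acc) acc) acc
      = acc ++ (List.replicate l.length (l2.flatMap (fun j => List.replicate rng.length j))).flatten := by
  have h : (fun (acc : List Int) (_i : Int) =>
      l2.foldl (fun acc j => rng.foldl (fun acc _ => acc ++ [j]) acc) acc)
      = fun acc _i => acc ++ l2.flatMap (fun j => List.replicate rng.length j) := by
    funext acc i
    simp only [pv_inner]
    simp only [PySem.List.foldl_append_eq_flatMap]
  rw [h, pv_foldl_const_append]

-- ===== VERDICT (by name: the statement is the Claim_ definition above) =====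

theorem gene3ValuesLoop_spec : Claim_equal_gene3ValuesLoop := by
  intro values1 values2 values3 inputValues _
  unfold Spec_gene3ValuesLoop gene3ValuesLoop gene3ValuesLoop_alt
  simp only [pv_A1, pv_A2, pv_pairfold, PySem.List.length_pyRange_one]
  refine Prod.ext ?_ (Prod.ext ?_ ?_)
  · have h2 : ((inputValues.length : Int) * inputValues.length).toNat
        = inputValues.length * inputValues.length := by
      rw [← Nat.cast_mul, Int.toNat_natCast]
    simp [PySem.List.pyRepeat_singleton, h2]
  · simp [PySem.List.pyRepeat]
  · simp [PySem.List.pyRepeat, sq]
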